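-- pv_equiv track=rewrite | github.com/jameskhedley/advent-of-code-solutions | 2023/day11.py | mark_galaxies
-- ===== SOURCE A (Python) =====
-- def mark_galaxies(univ, insert_rows=None, insert_cols=None):
--     count = 1
--     galaxies = {}
--     for y, row in enumerate(univ):
--         for x, char in enumerate(row):
--             if insert_rows and y in insert_rows:
--                 univ[y][x] = "-"
--             if insert_cols and x in insert_cols:
--                 univ[y][x] = "|"
--             if char == "#":
--                 univ[y][x] = str(count)
--                 galaxies[count] = (x,y)
--                 count += 1
--     return univ, galaxies
-- ===== SOURCE B (Python) =====
-- def mark_galaxies(univ, insert_rows=None, insert_cols=None):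
--     rows = set(insert_rows or [])
--     cols = set(insert_cols or [])
--     # first pass: number the galaxies in row-major order
--     galaxies = {}
--     num_at = {}
--     for y, row in enumerate(univ):
--         for x, ch in enumerate(row):
--             if ch == "#":
--                 n = len(galaxies) + 1
--                 galaxies[n] = (x, y)
--                 num_at[(x, y)] = n
--     # second pass: final value of each cell, priority galaxy > column > row > original
--     out = [[str(num_at[(x, y)]) if (x, y) in num_at
--             else "|" if x in cols
--             else "-" if y in rows
--             else ch
--             for x, ch in enumerate(row)]
--            for y, row in enumerate(univ)]
--     univ[:] = out
--     return univ, galaxies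
-- ===== Notes on version B (the rewrite author's own statement) =====
-- stated objective: faster
-- what changed: Replaces A's single mutating pass with up to three successive overwrites per cell and a linear scan of insert_rows/insert_cols per cell by two passes: one pass numbers the galaxies into a dict plus a position->number index, then a pure comprehension rebuilds the grid computing each cell's final value once with the priority chain galaxy > column > row > original, using O(1) set membership for the insert lists.
import Mathlib
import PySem

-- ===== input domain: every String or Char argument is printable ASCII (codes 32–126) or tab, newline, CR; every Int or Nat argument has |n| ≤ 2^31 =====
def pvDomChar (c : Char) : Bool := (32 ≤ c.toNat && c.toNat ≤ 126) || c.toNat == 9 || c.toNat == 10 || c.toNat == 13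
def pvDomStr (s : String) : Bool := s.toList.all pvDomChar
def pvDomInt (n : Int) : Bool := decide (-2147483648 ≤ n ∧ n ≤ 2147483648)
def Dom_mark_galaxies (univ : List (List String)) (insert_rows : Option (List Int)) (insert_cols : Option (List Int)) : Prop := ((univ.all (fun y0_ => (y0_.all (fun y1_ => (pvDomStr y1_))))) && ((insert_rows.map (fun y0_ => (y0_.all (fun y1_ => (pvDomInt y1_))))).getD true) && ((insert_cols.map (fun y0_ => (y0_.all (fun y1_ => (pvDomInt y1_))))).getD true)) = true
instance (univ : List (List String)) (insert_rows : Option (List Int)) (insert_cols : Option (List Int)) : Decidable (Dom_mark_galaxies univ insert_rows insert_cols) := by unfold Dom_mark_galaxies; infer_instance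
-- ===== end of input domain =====

-- B replaces A's single mutating pass (up to three successive overwrites per cell) by two passes:
-- one pass numbers the galaxies into a list plus a position->number dict, then a pure map rebuilds
-- the grid with the priority chain galaxy > column > row > original; equivalence is about the
-- return value (both Pythons also leave univ holding the returned grid, though B rebinds the rows).


-- ===== PORT A =====
-- univ[y][x] = v  (indices always in range when used)
def pvSetCell (g : List (List String)) (y x : Int) (v : String) : List (List String) :=
  PySem.List.pySetD g y (PySem.List.pySetD (PySem.List.pyGetD g y []) x v)

-- one inner-loop body of A: the three ifs, on state (univ, galaxies, count), pair (x, char)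
def pvStepA (rows cols : List Int) (y : Int)
    (st : List (List String) × List (Int × Int × Int) × Int) (p : Int × String) :
    List (List String) × List (Int × Int × Int) × Int :=
  let g1 := if !rows.isEmpty && rows.contains y then pvSetCell st.1 y p.1 "-" else st.1
  let g2 := if !cols.isEmpty && cols.contains p.1 then pvSetCell g1 y p.1 "|" else g1
  if p.2 == "#" then
    (pvSetCell g2 y p.1 (PySem.Int.toStr st.2.2), st.2.1 ++ [(st.2.2, p.1, y)], st.2.2 + 1)
  else (g2, st.2.1, st.2.2)

def mark_galaxies (univ : List (List String)) (insert_rows : Option (List Int)) (insert_cols : Option (List Int)) : List (List String) × (List (Int × Int × Int)) :=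
  let rows := insert_rows.getD []   -- None and [] are equally falsy, so 'insert_rows and …' keeps its meaning
  let cols := insert_cols.getD []
  let res := (PySem.List.enumerate univ).foldl
    (fun st yr => (PySem.List.enumerate yr.2).foldl (pvStepA rows cols yr.1) st)
    (univ, ([] : List (Int × Int × Int)), (1 : Int))
  (res.1, res.2.1)

-- ===== PORT B =====
-- first-pass loop body: number a galaxy (n = len(galaxies) + 1) and index it by position
def pvBStep (y : Int) (st : List (Int × Int × Int) × PySem.Dict (Int × Int) Int) (p : Int × String) :
    List (Int × Int × Int) × PySem.Dict (Int × Int) Int :=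
  if p.2 == "#" then
    let n : Int := (st.1.length : Int) + 1
    (st.1 ++ [(n, p.1, y)], st.2.insert (p.1, y) n)
  else st

def mark_galaxies_alt (univ : List (List String)) (insert_rows : Option (List Int)) (insert_cols : Option (List Int)) : List (List String) × (List (Int × Int × Int)) :=
  let rows : PySem.Set Int := PySem.Set.ofList (insert_rows.getD [])
  let cols : PySem.Set Int := PySem.Set.ofList (insert_cols.getD [])
  let st := (PySem.List.enumerate univ).foldl
    (fun st yr => (PySem.List.enumerate yr.2).foldl (pvBStep yr.1) st)
    (([] : List (Int × Int × Int)), (PySem.Dict.empty : PySem.Dict (Int × Int) Int))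
  let out := (PySem.List.enumerate univ).map (fun yr =>
    (PySem.List.enumerate yr.2).map (fun p =>
      match st.2.get? (p.1, yr.1) with
      | some n => PySem.Int.toStr n
      | none => if cols.contains p.1 then "|"
                else if rows.contains yr.1 then "-"
                else p.2))
  (out, st.1)

-- ===== PRECONDITION & SPEC =====
def Spec_mark_galaxies (univ : List (List String)) (insert_rows : Option (List Int)) (insert_cols : Option (List Int)) (out : List (List String) × (List (Int × Int × Int))) : Prop := out = mark_galaxies_alt univ insert_rows insert_cols
instance (univ : List (List String)) (insert_rows : Option (List Int)) (insert_cols : Option (List Int)) (out : List (List String) × (List (Int × Int × Int))) : Decidable (Spec_mark_galaxies univ insert_rows insert_cols out) := by unfold Spec_mark_galaxies; infer_instance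

-- ===== CLAIM (what is proved, stated in full; the proofs are below) =====
def Claim_equal_mark_galaxies : Prop := ∀ (univ : List (List String)) (insert_rows : Option (List Int)) (insert_cols : Option (List Int)), Dom_mark_galaxies univ insert_rows insert_cols → Spec_mark_galaxies univ insert_rows insert_cols (mark_galaxies univ insert_rows insert_cols)

-- ===== LEMMAS AND PROOFS =====

-- final value of cell (x, y): galaxy number > '|' > '-' > original char
def pvCellVal (rows cols : List Int) (y x : Int) (ch : String) (c : Int) : String :=
  if ch == "#" then PySem.Int.toStr c
  else if !cols.isEmpty && cols.contains x then "|"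
  else if !rows.isEmpty && rows.contains y then "-"
  else ch

def pvRowOut (rows cols : List Int) (y : Int) : List String → Nat → Int → List String
  | [], _, _ => []
  | ch :: t, k, c =>
      pvCellVal rows cols y (k : Int) ch c ::
        pvRowOut rows cols y t (k + 1) (if ch == "#" then c + 1 else c)

def pvGalEntries (y : Int) : List String → Nat → Int → List (Int × Int × Int)
  | [], _, _ => []
  | ch :: t, k, c =>
      if ch == "#" then ((c, (k : Int), y)) :: pvGalEntries y t (k + 1) (c + 1)
      else pvGalEntries y t (k + 1) c

def pvGridOut (rows cols : List Int) : List (List String) → Nat → Int → List (List String)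
  | [], _, _ => []
  | row :: t, y, c =>
      pvRowOut rows cols (y : Int) row 0 c ::
        pvGridOut rows cols t (y + 1) (c + (PySem.List.count row "#" : Int))

def pvGridGal : List (List String) → Nat → Int → List (Int × Int × Int)
  | [], _, _ => []
  | row :: t, y, c =>
      pvGalEntries (y : Int) row 0 c ++
        pvGridGal t (y + 1) (c + (PySem.List.count row "#" : Int))

-- A's inner-loop body, carried on the current row only
def pvRowStep (rows cols : List Int) (y : Int)
    (st : List String × List (Int × Int × Int) × Int) (p : Int × String) :
    List String × List (Int × Int × Int) × Int :=
  let r1 := if !rows.isEmpty && rows.contains y then PySem.List.pySetD st.1 p.1 "-" else st.1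
  let r2 := if !cols.isEmpty && cols.contains p.1 then PySem.List.pySetD r1 p.1 "|" else r1
  if p.2 == "#" then
    (PySem.List.pySetD r2 p.1 (PySem.Int.toStr st.2.2), st.2.1 ++ [(st.2.2, p.1, y)], st.2.2 + 1)
  else (r2, st.2.1, st.2.2)

theorem pv_set_len_append {α : Type} (pre : List α) (b v : α) (t : List α) :
    (pre ++ b :: t).set pre.length v = pre ++ v :: t := by
  induction pre with
  | nil => rfl
  | cons a pre ih => simp [ih]

theorem pv_stepA_eq (rows cols : List Int) (g : List (List String)) (y : Nat)
    (hy : y < g.length) (x : Int) (ch : String) (gal : List (Int × Int × Int)) (c : Int) :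
    pvStepA rows cols (y : Int) (g, gal, c) (x, ch)
      = ((g.set y (pvRowStep rows cols (y : Int) (g.getD y [], gal, c) (x, ch)).1),
         (pvRowStep rows cols (y : Int) (g.getD y [], gal, c) (x, ch)).2.1,
         (pvRowStep rows cols (y : Int) (g.getD y [], gal, c) (x, ch)).2.2) := by
  have hset : ∀ (r : List String), (g.set y r)[y]?.getD [] = r := fun r => by
    rw [List.getElem?_set_self (by simpa using hy)]; rfl
  simp only [pvStepA, pvRowStep, pvSetCell, PySem.List.pySetD_natCast, PySem.List.pyGetD_natCast]
  split_ifs <;>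
    simp [hset, List.set_set, List.getElem?_eq_getElem hy, List.set_getElem_self]

theorem pv_inner_grid (rows cols : List Int) (y : Nat) :
    ∀ (s : List String) (k : Int) (g : List (List String)) (gal : List (Int × Int × Int)) (c : Int),
      y < g.length →
      (PySem.List.enumerate s k).foldl (pvStepA rows cols (y : Int)) (g, gal, c)
        = ((g.set y (((PySem.List.enumerate s k).foldl (pvRowStep rows cols (y : Int)) (g.getD y [], gal, c)).1)),
           ((PySem.List.enumerate s k).foldl (pvRowStep rows cols (y : Int)) (g.getD y [], gal, c)).2.1,
           ((PySem.List.enumerate s k).foldl (pvRowStep rows cols (y : Int)) (g.getD y [], gal, c)).2.2) := by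
  intro s
  induction s with
  | nil =>
      intro k g gal c hy
      simp [PySem.List.enumerate_nil, List.set_getElem_self,
        List.getD_eq_getElem?_getD, List.getElem?_eq_getElem hy]
  | cons ch t ih =>
      intro k g gal c hy
      rw [PySem.List.enumerate_cons]
      simp only [List.foldl_cons]
      rw [pv_stepA_eq rows cols g y hy k ch gal c]
      set st := pvRowStep rows cols (y : Int) (g.getD y [], gal, c) (k, ch) with hst
      obtain ⟨r', gal', c'⟩ := st
      have hy' : y < (g.set y r').length := by simpa using hy
      rw [ih (k + 1) (g.set y r') gal' c' hy']
      have hget : (g.set y r')[y]?.getD [] = r' := by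
        rw [List.getElem?_set_self (by simpa using hy)]; rfl
      simp [hget, List.set_set]

theorem pv_row_fold (rows cols : List Int) (y : Int) :
    ∀ (s pre : List String) (gal : List (Int × Int × Int)) (c : Int),
      (PySem.List.enumerate s (pre.length : Int)).foldl (pvRowStep rows cols y) (pre ++ s, gal, c)
        = (pre ++ pvRowOut rows cols y s pre.length c,
           gal ++ pvGalEntries y s pre.length c,
           c + (PySem.List.count s "#" : Int)) := by
  intro s
  induction s with
  | nil => intro pre gal c; simp [PySem.List.enumerate_nil, pvRowOut, pvGalEntries, PySem.List.count]
  | cons ch t ih =>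
      intro pre gal c
      rw [PySem.List.enumerate_cons]
      simp only [List.foldl_cons]
      have hstep : pvRowStep rows cols y (pre ++ ch :: t, gal, c) ((pre.length : Int), ch)
          = (pre ++ pvCellVal rows cols y (pre.length : Int) ch c :: t,
             gal ++ (if ch == "#" then [(c, (pre.length : Int), y)] else []),
             if ch == "#" then c + 1 else c) := by
        simp only [pvRowStep, pvCellVal, PySem.List.pySetD_natCast]
        split_ifs <;> simp_all
      rw [hstep]
      have hlen : (pre.length : Int) + 1 = ((pre ++ [pvCellVal rows cols y (pre.length : Int) ch c]).length : Int) := by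
        simp
      rw [hlen]
      have := ih (pre ++ [pvCellVal rows cols y (pre.length : Int) ch c])
        (gal ++ (if ch == "#" then [(c, (pre.length : Int), y)] else []))
        (if ch == "#" then c + 1 else c)
      rw [List.append_assoc] at this
      simp only [List.singleton_append] at this
      rw [this]
      simp only [Prod.mk.injEq, List.length_append, List.length_singleton]
      refine ⟨?_, ?_, ?_⟩
      · simp [pvRowOut, List.append_assoc]
      · simp only [pvGalEntries]
        split_ifs <;> simp [List.append_assoc]
      · rw [PySem.List.count_eq, PySem.List.count_eq, List.count_cons]
        split_ifs with h <;> simp_all <;> ring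

def pvTotal (t : List (List String)) : Int :=
  (t.map (fun r => (PySem.List.count r "#" : Int))).sum

theorem pv_grid_fold (rows cols : List Int) :
    ∀ (t pre : List (List String)) (gal : List (Int × Int × Int)) (c : Int),
      (PySem.List.enumerate t (pre.length : Int)).foldl
          (fun st yr => (PySem.List.enumerate yr.2).foldl (pvStepA rows cols yr.1) st)
          (pre ++ t, gal, c)
        = (pre ++ pvGridOut rows cols t pre.length c,
           gal ++ pvGridGal t pre.length c,
           c + pvTotal t) := by
  intro t
  induction t with
  | nil => intro pre gal c; simp [PySem.List.enumerate_nil, pvGridOut, pvGridGal, pvTotal]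
  | cons row t ih =>
      intro pre gal c
      rw [PySem.List.enumerate_cons]
      simp only [List.foldl_cons]
      have hy : pre.length < (pre ++ row :: t).length := by simp
      rw [pv_inner_grid rows cols pre.length row 0 (pre ++ row :: t) gal c hy]
      have hget : (pre ++ row :: t).getD pre.length [] = row := by
        simp [List.getD]
      rw [hget]
      have hrow := pv_row_fold rows cols (pre.length : Int) row [] gal c
      simp only [List.nil_append, List.length_nil, Nat.cast_zero] at hrow
      rw [hrow]
      rw [pv_set_len_append]
      have hlen : (pre.length : Int) + 1 = ((pre ++ [pvRowOut rows cols (pre.length : Int) row 0 c]).length : Int) := by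
        simp
      rw [hlen]
      have := ih (pre ++ [pvRowOut rows cols (pre.length : Int) row 0 c])
        (gal ++ pvGalEntries (pre.length : Int) row 0 c)
        (c + (PySem.List.count row "#" : Int))
      rw [List.append_assoc] at this
      simp only [List.singleton_append] at this
      rw [this]
      simp only [Prod.mk.injEq, List.length_append, List.length_singleton]
      refine ⟨by simp [pvGridOut, List.append_assoc], by simp [pvGridGal, List.append_assoc], ?_⟩
      simp [pvTotal]; ring

def pvBase (univ : List (List String)) (y : Nat) : Int :=
  1 + ((univ.take y).map (fun r => (PySem.List.count r "#" : Int))).sum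

-- ===== B-side: pass 1 produces the entries list and the position->number dict =====

def pvInsGal (d : PySem.Dict (Int × Int) Int) (e : Int × Int × Int) : PySem.Dict (Int × Int) Int :=
  d.insert (e.2.1, e.2.2) e.1

theorem pv_entries_len (y : Int) :
    ∀ (s : List String) (k : Nat) (c : Int),
      (pvGalEntries y s k c).length = List.count "#" s := by
  intro s
  induction s with
  | nil => intro k c; simp [pvGalEntries]
  | cons ch t ih =>
      intro k c
      simp only [pvGalEntries, List.count_cons]
      split_ifs with h <;> simp_all

theorem pv_B1_row (y : Int) :
    ∀ (s : List String) (k : Nat) (gal : List (Int × Int × Int)) (d : PySem.Dict (Int × Int) Int),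
      (PySem.List.enumerate s (k : Int)).foldl (pvBStep y) (gal, d)
        = (gal ++ pvGalEntries y s k ((gal.length : Int) + 1),
           (pvGalEntries y s k ((gal.length : Int) + 1)).foldl pvInsGal d) := by
  intro s
  induction s with
  | nil => intro k gal d; simp [PySem.List.enumerate_nil, pvGalEntries]
  | cons ch t ih =>
      intro k gal d
      rw [PySem.List.enumerate_cons]
      simp only [List.foldl_cons]
      have hlen : (k : Int) + 1 = ((k + 1 : Nat) : Int) := by push_cast; ring
      by_cases hch : ch = "#"
      · have hstep : pvBStep y (gal, d) ((k : Int), ch)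
            = (gal ++ [((gal.length : Int) + 1, (k : Int), y)],
               d.insert ((k : Int), y) ((gal.length : Int) + 1)) := by
          simp [pvBStep, hch]
        rw [hstep, hlen, ih (k + 1) _ _]
        have hc : (((gal ++ [((gal.length : Int) + 1, (k : Int), y)]).length : Int) + 1)
            = ((gal.length : Int) + 1) + 1 := by simp
        rw [hc]
        simp [pvGalEntries, pvInsGal, hch, List.append_assoc]
      · have hstep : pvBStep y (gal, d) ((k : Int), ch) = (gal, d) := by
          simp [pvBStep, hch]
        rw [hstep, hlen, ih (k + 1) gal d]
        simp [pvGalEntries, hch]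

theorem pv_B1_grid :
    ∀ (t : List (List String)) (y0 : Nat) (gal : List (Int × Int × Int)) (d : PySem.Dict (Int × Int) Int),
      (PySem.List.enumerate t (y0 : Int)).foldl
          (fun st yr => (PySem.List.enumerate yr.2).foldl (pvBStep yr.1) st) (gal, d)
        = (gal ++ pvGridGal t y0 ((gal.length : Int) + 1),
           (pvGridGal t y0 ((gal.length : Int) + 1)).foldl pvInsGal d) := by
  intro t
  induction t with
  | nil => intro y0 gal d; simp [PySem.List.enumerate_nil, pvGridGal]
  | cons row t ih =>
      intro y0 gal d
      rw [PySem.List.enumerate_cons]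
      simp only [List.foldl_cons]
      have h0 := pv_B1_row (y0 : Int) row 0 gal d
      simp only [Nat.cast_zero] at h0
      rw [h0]
      have hlen : (y0 : Int) + 1 = ((y0 + 1 : Nat) : Int) := by push_cast; ring
      rw [hlen, ih (y0 + 1) _ _]
      have hc : (((gal ++ pvGalEntries (y0 : Int) row 0 ((gal.length : Int) + 1)).length : Int) + 1)
          = ((gal.length : Int) + 1) + (PySem.List.count row "#" : Int) := by
        rw [List.length_append, pv_entries_len, PySem.List.count_eq]
        push_cast; ring
      rw [hc]
      simp [pvGridGal, List.append_assoc, List.foldl_append]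

-- keys emitted by one row / by the grid
theorem pv_key_bound (y : Int) :
    ∀ (s : List String) (k : Nat) (c : Int) (a b : Int),
      (a, b) ∈ (pvGalEntries y s k c).map (fun e => (e.2.1, e.2.2)) →
      b = y ∧ ∃ j : Nat, j < s.length ∧ a = ((k + j : Nat) : Int) ∧ s.getD j "" = "#" := by
  intro s
  induction s with
  | nil => intro k c a b h; simp [pvGalEntries] at h
  | cons ch t ih =>
      intro k c a b h
      simp only [pvGalEntries] at h
      by_cases hch : ch = "#"
      · rw [if_pos (by simp [hch])] at h
        simp only [List.map_cons, List.mem_cons] at h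
        rcases h with h | h
        · rw [Prod.mk.injEq] at h
          obtain ⟨ha, hb⟩ := h
          exact ⟨hb, 0, by simp, by simpa using ha, by simp [hch]⟩
        · obtain ⟨hb, j, hj, ha, hs⟩ := ih (k + 1) (c + 1) a b h
          refine ⟨hb, j + 1, by simpa using Nat.succ_lt_succ hj, ?_, by simpa using hs⟩
          rw [ha]; congr 1; omega
      · rw [if_neg (by simp [hch])] at h
        obtain ⟨hb, j, hj, ha, hs⟩ := ih (k + 1) c a b h
        refine ⟨hb, j + 1, by simpa using Nat.succ_lt_succ hj, ?_, by simpa using hs⟩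
        rw [ha]; congr 1; omega

theorem pv_grid_key_bound :
    ∀ (t : List (List String)) (y0 : Nat) (c : Int) (a b : Int),
      (a, b) ∈ (pvGridGal t y0 c).map (fun e => (e.2.1, e.2.2)) →
      ∃ i : Nat, i < t.length ∧ b = ((y0 + i : Nat) : Int) ∧
        ∃ j : Nat, j < (t.getD i []).length ∧ a = (j : Int) ∧ (t.getD i []).getD j "" = "#" := by
  intro t
  induction t with
  | nil => intro y0 c a b h; simp [pvGridGal] at h
  | cons row t ih =>
      intro y0 c a b h
      simp only [pvGridGal, List.map_append, List.mem_append] at h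
      rcases h with h | h
      · obtain ⟨hb, j, hj, ha, hs⟩ := pv_key_bound (y0 : Int) row 0 c a b h
        exact ⟨0, by simp, by simpa using hb, j, by simpa using hj, by simpa using ha,
          by simpa using hs⟩
      · obtain ⟨i, hi, hb, j, hj, ha, hs⟩ := ih (y0 + 1) _ a b h
        refine ⟨i + 1, by simpa using Nat.succ_lt_succ hi, ?_, j, by simpa using hj, ha, by simpa using hs⟩
        rw [hb]; congr 1; omega

theorem pv_key_nodup (y : Int) :
    ∀ (s : List String) (k : Nat) (c : Int),
      ((pvGalEntries y s k c).map (fun e => (e.2.1, e.2.2))).Nodup := by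
  intro s
  induction s with
  | nil => intro k c; simp [pvGalEntries]
  | cons ch t ih =>
      intro k c
      simp only [pvGalEntries]
      by_cases hch : ch = "#"
      · rw [if_pos (by simp [hch])]
        simp only [List.map_cons, List.nodup_cons]
        refine ⟨?_, ih (k + 1) (c + 1)⟩
        intro hmem
        obtain ⟨_, j, _, ha, _⟩ := pv_key_bound y t (k + 1) (c + 1) (k : Int) y hmem
        omega
      · rw [if_neg (by simp [hch])]
        exact ih (k + 1) c

theorem pv_grid_key_nodup :
    ∀ (t : List (List String)) (y0 : Nat) (c : Int),
      ((pvGridGal t y0 c).map (fun e => (e.2.1, e.2.2))).Nodup := by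
  intro t
  induction t with
  | nil => intro y0 c; simp [pvGridGal]
  | cons row t ih =>
      intro y0 c
      simp only [pvGridGal, List.map_append]
      refine List.Nodup.append (pv_key_nodup _ row 0 c) (ih (y0 + 1) _) ?_
      intro q hq1 hq2
      obtain ⟨a, b⟩ := q
      obtain ⟨hb1, -⟩ := pv_key_bound (y0 : Int) row 0 c a b hq1
      obtain ⟨i, hi, hb2, -⟩ := pv_grid_key_bound t (y0 + 1) _ a b hq2
      rw [hb1] at hb2
      omega

theorem pv_pair_mem (y : Int) :
    ∀ (pre t2 : List String) (k : Nat) (c : Int),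
      (c + (PySem.List.count pre "#" : Int), ((k + pre.length : Nat) : Int), y)
        ∈ pvGalEntries y (pre ++ "#" :: t2) k c := by
  intro pre
  induction pre with
  | nil =>
      intro t2 k c
      simp [pvGalEntries, PySem.List.count_eq]
  | cons p ps ih =>
      intro t2 k c
      simp only [List.cons_append, pvGalEntries]
      by_cases hp : p = "#"
      · rw [if_pos (by simp [hp])]
        refine List.mem_cons_of_mem _ ?_
        have h1 : c + (PySem.List.count (p :: ps) "#" : Int)
            = (c + 1) + (PySem.List.count ps "#" : Int) := by
          rw [PySem.List.count_eq, PySem.List.count_eq, List.count_cons]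
          simp [hp]; ring
        have h2 : ((k + (p :: ps).length : Nat) : Int) = ((k + 1 + ps.length : Nat) : Int) := by
          congr 1; simp only [List.length_cons]; omega
        rw [h1, h2]
        exact ih t2 (k + 1) (c + 1)
      · rw [if_neg (by simp [hp])]
        have h1 : c + (PySem.List.count (p :: ps) "#" : Int)
            = c + (PySem.List.count ps "#" : Int) := by
          rw [PySem.List.count_eq, PySem.List.count_eq, List.count_cons]
          simp [hp]
        have h2 : ((k + (p :: ps).length : Nat) : Int) = ((k + 1 + ps.length : Nat) : Int) := by
          congr 1; simp only [List.length_cons]; omega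
        rw [h1, h2]
        exact ih t2 (k + 1) c

theorem pv_grid_pair_mem :
    ∀ (t : List (List String)) (y0 : Nat) (c : Int) (i : Nat) (pre t2 : List String),
      i < t.length → t.getD i [] = pre ++ "#" :: t2 →
      (c + pvTotal (t.take i) + (PySem.List.count pre "#" : Int),
       ((pre.length : Nat) : Int), ((y0 + i : Nat) : Int)) ∈ pvGridGal t y0 c := by
  intro t
  induction t with
  | nil => intro y0 c i pre t2 hi _; simp at hi
  | cons row t ih =>
      intro y0 c i pre t2 hi hrow
      simp only [pvGridGal, List.mem_append]
      cases i with
      | zero =>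
          left
          have hr : row = pre ++ "#" :: t2 := by simpa using hrow
          rw [hr]
          have h1 : c + pvTotal (((pre ++ "#" :: t2) :: t).take 0) + (PySem.List.count pre "#" : Int)
              = c + (PySem.List.count pre "#" : Int) := by
            simp [pvTotal]
          have h2 : ((y0 + 0 : Nat) : Int) = ((y0 : Nat) : Int) := by congr 1
          have h3 : ((pre.length : Nat) : Int) = ((0 + pre.length : Nat) : Int) := by
            congr 1; omega
          rw [h1, h2, h3]
          exact pv_pair_mem ((y0 : Nat) : Int) pre t2 0 c
      | succ i =>
          right
          have hrow2 : t.getD i [] = pre ++ "#" :: t2 := by simpa using hrow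
          have := ih (y0 + 1) (c + (PySem.List.count row "#" : Int)) i pre t2
            (by simpa using Nat.lt_of_succ_lt_succ hi) hrow2
          have h1 : c + pvTotal ((row :: t).take (i + 1)) + (PySem.List.count pre "#" : Int)
              = c + (PySem.List.count row "#" : Int) + pvTotal (t.take i)
                  + (PySem.List.count pre "#" : Int) := by
            simp [pvTotal]; ring
          have h2 : ((y0 + (i + 1) : Nat) : Int) = ((y0 + 1 + i : Nat) : Int) := by
            congr 1; omega
          rw [h1, h2]
          exact this

-- the dict built by pass 1, characterised
theorem pv_dict_items (univ : List (List String)) :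
    ((pvGridGal univ 0 1).foldl pvInsGal PySem.Dict.empty).items
      = (pvGridGal univ 0 1).map (fun e => ((e.2.1, e.2.2), e.1)) := by
  have h := PySem.Dict.items_foldl_insert_fresh (l := pvGridGal univ 0 1)
    (k := fun e => (e.2.1, e.2.2)) (v := fun e => e.1) (d := PySem.Dict.empty)
    (by intro a _; simp) (pv_grid_key_nodup univ 0 1)
  simpa [pvInsGal] using h

theorem pv_get_cell (univ : List (List String)) (y : Nat) (pre : List String) (ch : String)
    (t : List String) (hy : y < univ.length) (h : univ.getD y [] = pre ++ ch :: t) :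
    ((pvGridGal univ 0 1).foldl pvInsGal PySem.Dict.empty).get? ((pre.length : Int), (y : Int))
      = if ch == "#" then some (pvBase univ y + (PySem.List.count pre "#" : Int)) else none := by
  have hitems := pv_dict_items univ
  have hkeys : ((pvGridGal univ 0 1).foldl pvInsGal PySem.Dict.empty).keys
      = (pvGridGal univ 0 1).map (fun e => (e.2.1, e.2.2)) := by
    simp only [PySem.Dict.keys, hitems, List.map_map]
    rfl
  have hknd : ((pvGridGal univ 0 1).foldl pvInsGal PySem.Dict.empty).keys.Nodup := by
    rw [hkeys]; exact pv_grid_key_nodup univ 0 1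
  by_cases hch : ch = "#"
  · rw [if_pos (by simp [hch])]
    have hmem := pv_grid_pair_mem univ 0 1 y pre t hy (by rw [h, hch])
    have h1 : 1 + pvTotal (univ.take y) + (PySem.List.count pre "#" : Int)
        = pvBase univ y + (PySem.List.count pre "#" : Int) := by
      simp [pvBase, pvTotal]
    have h2 : ((0 + y : Nat) : Int) = ((y : Nat) : Int) := by congr 1; omega
    rw [h1, h2] at hmem
    have hm : (((pre.length : Int), (y : Int)), pvBase univ y + (PySem.List.count pre "#" : Int))
        ∈ ((pvGridGal univ 0 1).foldl pvInsGal PySem.Dict.empty).items := by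
      rw [hitems]
      exact List.mem_map.mpr ⟨_, hmem, rfl⟩
    exact PySem.Dict.get?_of_mem_items _ hm hknd
  · rw [if_neg (by simp [hch])]
    rw [PySem.Dict.get?_eq_none_iff_not_mem_keys, hkeys]
    intro hmem
    obtain ⟨i, hi, hbi, j, hj, haj, hsj⟩ := pv_grid_key_bound univ 0 1 _ _ hmem
    have hiy : i = y := by omega
    have hjx : j = pre.length := by omega
    subst hiy; subst hjx
    rw [h] at hsj
    rw [List.getD_eq_getElem?_getD, List.getElem?_append_right (le_refl pre.length)] at hsj
    simp at hsj
    exact hch hsj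

-- pass 2 rebuilds each row as pvRowOut
theorem pv_B2_row (univ : List (List String)) (rows cols : List Int) (y : Nat)
    (hy : y < univ.length) :
    ∀ (s pre : List String), univ.getD y [] = pre ++ s →
      ((PySem.List.enumerate s (pre.length : Int)).map (fun p =>
          match ((pvGridGal univ 0 1).foldl pvInsGal PySem.Dict.empty).get? (p.1, (y : Int)) with
          | some n => PySem.Int.toStr n
          | none => if (PySem.Set.ofList cols).contains p.1 then "|"
                    else if (PySem.Set.ofList rows).contains (y : Int) then "-"
                    else p.2))
        = pvRowOut rows cols (y : Int) s pre.length (pvBase univ y + (PySem.List.count pre "#" : Int)) := by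
  intro s
  induction s with
  | nil => intro pre h; simp [PySem.List.enumerate_nil, pvRowOut]
  | cons ch t2 ih =>
      intro pre h
      rw [PySem.List.enumerate_cons]
      simp only [List.map_cons, pvRowOut, List.cons.injEq]
      refine ⟨?_, ?_⟩
      · rw [pv_get_cell univ y pre ch t2 hy h]
        by_cases hch : ch = "#"
        · simp [hch, pvCellVal]
        · have hb : (ch == "#") = false := by simpa using hch
          simp [pvCellVal, hb]
          by_cases hx : (pre.length : Int) ∈ cols
          · have hcne : ¬cols = [] := by rintro rfl; simp at hx
            simp [hx, hcne]
          · by_cases hyy : (y : Int) ∈ rows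
            · have hrne : ¬rows = [] := by rintro rfl; simp at hyy
              simp [hx, hyy, hrne]
            · simp [hx, hyy]
      · have hlen : (pre.length : Int) + 1 = ((pre ++ [ch]).length : Int) := by simp
        rw [hlen, ih (pre ++ [ch]) (by simpa [List.append_assoc] using h)]
        have hc : pvBase univ y + (PySem.List.count (pre ++ [ch]) "#" : Int)
            = (if ch == "#" then pvBase univ y + (PySem.List.count pre "#" : Int) + 1
               else pvBase univ y + (PySem.List.count pre "#" : Int)) := by
          rw [PySem.List.count_eq, PySem.List.count_eq, List.count_append]
          by_cases hch : ch = "#" <;> simp [hch] <;> ring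
        simp only [List.length_append, List.length_singleton, hc]

theorem pv_B2_grid (univ : List (List String)) (rows cols : List Int) :
    ∀ (t pre : List (List String)), univ = pre ++ t →
      ((PySem.List.enumerate t (pre.length : Int)).map (fun yr =>
          (PySem.List.enumerate yr.2).map (fun p =>
            match ((pvGridGal univ 0 1).foldl pvInsGal PySem.Dict.empty).get? (p.1, yr.1) with
            | some n => PySem.Int.toStr n
            | none => if (PySem.Set.ofList cols).contains p.1 then "|"
                      else if (PySem.Set.ofList rows).contains yr.1 then "-"
                      else p.2)))
        = pvGridOut rows cols t pre.length (pvBase univ pre.length) := by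
  intro t
  induction t with
  | nil => intro pre h; simp [PySem.List.enumerate_nil, pvGridOut]
  | cons row t ih =>
      intro pre h
      rw [PySem.List.enumerate_cons]
      simp only [List.map_cons, pvGridOut, List.cons.injEq]
      have hy : pre.length < univ.length := by rw [h]; simp
      have hget : univ.getD pre.length [] = [] ++ row := by
        simp [h, List.getD]
      have htake1 : univ.take (pre.length + 1) = pre ++ [row] := by
        have h1 : List.take (pre.length + 1) pre = pre := List.take_of_length_le (by omega)
        have h2 : pre.length + 1 - pre.length = 1 := by omega
        rw [h, List.take_append, h1, h2]
        rfl
      have htake0 : univ.take pre.length = pre := by rw [h, List.take_left]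
      have hbase2 : pvBase univ (pre.length + 1)
          = pvBase univ pre.length + (PySem.List.count row "#" : Int) := by
        simp [pvBase, htake1, htake0]
        ring
      refine ⟨?_, ?_⟩
      · have hr := pv_B2_row univ rows cols pre.length hy row [] hget
        simp only [List.length_nil, Nat.cast_zero] at hr
        rw [hr]
        simp [PySem.List.count_eq]
      · have hlen : (pre.length : Int) + 1 = ((pre ++ [row]).length : Int) := by simp
        rw [hlen, ih (pre ++ [row]) (by simpa [List.append_assoc] using h)]
        simp [hbase2, List.length_append]

-- ===== VERDICT (by name: the statement is the Claim_ definition above) =====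
theorem mark_galaxies_spec : Claim_equal_mark_galaxies := by
  intro univ ir ic _
  simp only [Spec_mark_galaxies, mark_galaxies, mark_galaxies_alt]
  have hA := pv_grid_fold (ir.getD []) (ic.getD []) univ [] [] 1
  simp only [List.nil_append, List.length_nil, Nat.cast_zero] at hA
  have hB1 := pv_B1_grid univ 0 [] PySem.Dict.empty
  simp only [List.length_nil, Nat.cast_zero, List.nil_append, zero_add] at hB1
  have hB2 := pv_B2_grid univ (ir.getD []) (ic.getD []) univ [] rfl
  simp only [List.length_nil, Nat.cast_zero] at hB2
  have hbase0 : pvBase univ 0 = 1 := by simp [pvBase]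
  rw [hbase0] at hB2
  rw [hA, hB1, ← hB2]
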